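-- pv_equiv track=rewrite | github.com/logannye/polybot | polybot/markets/sports_matcher.py | _find_earliest_index
-- ===== SOURCE A (Python) =====
-- def _find_earliest_index(question_lower: str, terms: list[str]) -> int:
--     """Return the earliest index at which any of ``terms`` appears,
--     or -1 if none match."""
--     best = -1
--     for t in terms:
--         if not t:
--             continue
--         idx = question_lower.find(t)
--         if idx >= 0 and (best == -1 or idx < best):
--             best = idx
--     return best
-- ===== SOURCE B (Python) =====
-- def _find_earliest_index(question_lower: str, terms: list[str]) -> int:
--     """Return the earliest index at which any of ``terms`` appears,
--     or -1 if none match."""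
--     nonempty = [t for t in terms if t]
--     for i in range(len(question_lower)):
--         if any(question_lower[i:].startswith(t) for t in nonempty):
--             return i
--     return -1
-- ===== Notes on version B (the rewrite author's own statement) =====
-- stated objective: alternative
-- what changed: Replaces A's per-term str.find loop with a single left-to-right scan over start positions, returning the first index where any non-empty term starts (early exit at the earliest match instead of locating every term).
import Mathlib
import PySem

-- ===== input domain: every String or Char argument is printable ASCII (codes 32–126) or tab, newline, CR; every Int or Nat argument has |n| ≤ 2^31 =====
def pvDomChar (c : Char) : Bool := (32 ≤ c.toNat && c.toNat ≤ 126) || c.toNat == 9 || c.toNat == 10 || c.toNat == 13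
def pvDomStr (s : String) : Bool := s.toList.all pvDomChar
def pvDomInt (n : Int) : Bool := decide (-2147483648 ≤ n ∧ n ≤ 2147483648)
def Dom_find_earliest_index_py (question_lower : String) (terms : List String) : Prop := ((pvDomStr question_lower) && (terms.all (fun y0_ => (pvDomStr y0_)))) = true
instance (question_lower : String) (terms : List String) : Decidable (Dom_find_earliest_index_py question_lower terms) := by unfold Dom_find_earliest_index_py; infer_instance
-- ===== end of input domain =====

-- B replaces A's per-term str.find loop by one left-to-right scan over start positions
-- returning the first position where some non-empty term starts (alternative decomposition).

-- ===== PORT A =====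
-- loop body of A ('if not t: continue; idx = question_lower.find(t); if idx >= 0 and (best == -1 or idx < best): best = idx')
def pvStepA (question_lower : String) (best : Int) (t : String) : Int :=
  if t = "" then best
  else
    let idx := PySem.Str.find question_lower t
    if 0 ≤ idx ∧ (best = -1 ∨ idx < best) then idx else best

def find_earliest_index_py (question_lower : String) (terms : List String) : Int :=
  terms.foldl (pvStepA question_lower) (-1)

-- ===== PORT B =====
-- the 'for i in range(len(question_lower))' loop with early return
def pvAltLoop (ql : List Char) (ts : List (List Char)) : List Nat → Int
  | [] => -1
  | i :: rest =>
    if ts.any (fun t => PySem.Chars.startswith (ql.drop i) t) then (i : Int)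
    else pvAltLoop ql ts rest

def find_earliest_index_py_alt (question_lower : String) (terms : List String) : Int :=
  pvAltLoop question_lower.toList
    ((terms.filter (fun t => t ≠ "")).map String.toList)
    (List.range question_lower.toList.length)

-- ===== PRECONDITION & SPEC =====
def Spec_find_earliest_index_py (question_lower : String) (terms : List String) (out : Int) : Prop := out = find_earliest_index_py_alt question_lower terms
instance (question_lower : String) (terms : List String) (out : Int) : Decidable (Spec_find_earliest_index_py question_lower terms out) := by unfold Spec_find_earliest_index_py; infer_instance

-- ===== CLAIM (what is proved, stated in full; the proofs are below) =====
def Claim_equal_find_earliest_index_py : Prop := ∀ (question_lower : String) (terms : List String), Dom_find_earliest_index_py question_lower terms → Spec_find_earliest_index_py question_lower terms (find_earliest_index_py question_lower terms)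

-- ===== LEMMAS AND PROOFS =====

-- The positional scan returns the first element of the index list that matches, else -1.
theorem pvAltLoop_eq_find? (ql : List Char) (ts : List (List Char)) (l : List Nat) :
    pvAltLoop ql ts l =
      (l.find? (fun i => ts.any (fun t => PySem.Chars.startswith (ql.drop i) t))).elim (-1) (fun i => (i : Int)) := by
  induction l with
  | nil => rfl
  | cons i rest ih =>
    by_cases h : ts.any (fun t => PySem.Chars.startswith (ql.drop i) t) = true <;>
      simp [pvAltLoop, List.find?, h, ih]

theorem pvFind?_range' {p : Nat → Bool} :
    ∀ (s n k : Nat), s ≤ k → k < s + n → p k = true → (∀ j, s ≤ j → j < k → p j = false) →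
      (List.range' s n).find? p = some k := by
  intro s n
  induction n generalizing s with
  | zero => intro k h1 h2; omega
  | succ n ih =>
    intro k h1 h2 hp hmin
    rw [List.range'_succ]
    by_cases hs : s = k
    · subst hs; rw [List.find?_cons_of_pos hp]
    · have hps : p s = false := hmin s le_rfl (by omega)
      rw [List.find?_cons_of_neg (by simp [hps])]
      exact ih (s+1) k (by omega) (by omega) hp (fun j hj1 hj2 => hmin j (by omega) hj2)

-- the scan's per-position test, as a proposition over the original terms
theorem pvAny_iff (question_lower : String) (terms : List String) (i : Nat) :
    ((terms.filter (fun t => t ≠ "")).map String.toList).any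
        (fun t => PySem.Chars.startswith (question_lower.toList.drop i) t) = true
      ↔ ∃ t ∈ terms, t ≠ "" ∧ t.toList <+: question_lower.toList.drop i := by
  simp [List.any_eq_true, PySem.Chars.startswith_iff]

-- characterisation of A's fold
theorem pvFoldA_char (q : String) :
    ∀ (ts : List String) (best : Int), best = -1 ∨ 0 ≤ best →
      (ts.foldl (pvStepA q) best = -1 ∨ 0 ≤ ts.foldl (pvStepA q) best)
      ∧ (∀ t ∈ ts, t ≠ "" → 0 ≤ PySem.Str.find q t →
          ts.foldl (pvStepA q) best ≠ -1 ∧ ts.foldl (pvStepA q) best ≤ PySem.Str.find q t)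
      ∧ (best ≠ -1 → ts.foldl (pvStepA q) best ≠ -1 ∧ ts.foldl (pvStepA q) best ≤ best)
      ∧ (ts.foldl (pvStepA q) best ≠ -1 →
          ts.foldl (pvStepA q) best = best ∨
            ∃ t ∈ ts, t ≠ "" ∧ PySem.Str.find q t = ts.foldl (pvStepA q) best) := by
  intro ts
  induction ts with
  | nil =>
    intro best hb
    refine ⟨hb, by simp, fun h => ⟨h, le_rfl⟩, fun _ => Or.inl rfl⟩
  | cons t ts ih =>
    intro best hb
    simp only [List.foldl_cons]
    by_cases hte : t = ""
    · have hstep : pvStepA q best t = best := by simp [pvStepA, hte]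
      rw [hstep]
      obtain ⟨c1, c2, c3, c4⟩ := ih best hb
      refine ⟨c1, ?_, c3, ?_⟩
      · intro u hu hune hf
        rcases List.mem_cons.mp hu with h | h
        · subst h; exact absurd hte (by simpa using hune)
        · exact c2 u h hune hf
      · intro hr
        rcases c4 hr with h | ⟨u, hu, h1, h2⟩
        · exact Or.inl h
        · exact Or.inr ⟨u, List.mem_cons_of_mem _ hu, h1, h2⟩
    · set idx := PySem.Str.find q t with hidx
      by_cases hc : 0 ≤ idx ∧ (best = -1 ∨ idx < best)
      · have hstep : pvStepA q best t = idx := by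
          simp only [pvStepA, hte, if_false]; rw [← hidx]; exact if_pos hc
        rw [hstep]
        obtain ⟨c1, c2, c3, c4⟩ := ih idx (Or.inr hc.1)
        have hidxne : idx ≠ -1 := by omega
        have hle := c3 hidxne
        refine ⟨c1, ?_, ?_, ?_⟩
        · intro u hu hune hf
          rcases List.mem_cons.mp hu with h | h
          · subst h; exact ⟨hle.1, by rw [← hidx]; exact hle.2⟩
          · exact c2 u h hune hf
        · intro hbne
          rcases hc.2 with h | h
          · exact absurd h hbne
          · exact ⟨hle.1, le_trans hle.2 (le_of_lt h)⟩
        · intro hr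
          rcases c4 hr with h | ⟨u, hu, h1, h2⟩
          · exact Or.inr ⟨t, List.mem_cons_self, hte, by rw [← hidx, h]⟩
          · exact Or.inr ⟨u, List.mem_cons_of_mem _ hu, h1, h2⟩
      · have hstep : pvStepA q best t = best := by simp only [pvStepA, hte, if_false]; rw [← hidx]; simp [hc]
        rw [hstep]
        obtain ⟨c1, c2, c3, c4⟩ := ih best hb
        refine ⟨c1, ?_, c3, ?_⟩
        · intro u hu hune hf
          rcases List.mem_cons.mp hu with hh | hh
          · subst hh
            have hbne : best ≠ -1 ∧ best ≤ idx := by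
              rw [← hidx] at hf
              rcases hb with hb | hb
              · exact absurd ⟨hf, Or.inl hb⟩ hc
              · constructor
                · omega
                · by_contra hlt
                  exact hc ⟨hf, Or.inr (by omega)⟩
            have := c3 hbne.1
            exact ⟨this.1, le_trans this.2 (by rw [← hidx]; exact hbne.2)⟩
          · exact c2 u hh hune hf
        · intro hr
          rcases c4 hr with h | ⟨u, hu, h1, h2⟩
          · exact Or.inl h
          · exact Or.inr ⟨u, List.mem_cons_of_mem _ hu, h1, h2⟩

-- a non-empty term occurring as a prefix of a drop means the find is non-negative and ≤ that position
theorem pvPrefix_find (q : String) (t : String) (j : Nat)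
    (hp : t.toList <+: q.toList.drop j) :
    0 ≤ PySem.Str.find q t ∧ PySem.Str.find q t ≤ (j : Int) := by
  have hnn : 0 ≤ PySem.Chars.find q.toList t.toList := by
    rw [PySem.Chars.find_nonneg_iff]
    exact hp.isInfix.trans (List.drop_suffix j q.toList).isInfix
  have hspec := PySem.Chars.find_spec hnn
  have hle : (PySem.Chars.find q.toList t.toList).toNat ≤ j := by
    by_contra h
    exact hspec.2 j (by omega) hp
  simp only [PySem.Str.find]
  constructor
  · exact hnn
  · omega

-- ===== VERDICT (by name: the statement is the Claim_ definition above) =====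
theorem find_earliest_index_py_spec : Claim_equal_find_earliest_index_py := by
  intro q terms _
  unfold Spec_find_earliest_index_py
  unfold find_earliest_index_py find_earliest_index_py_alt
  rw [pvAltLoop_eq_find?]
  obtain ⟨c1, c2, _, c4⟩ := pvFoldA_char q terms (-1) (Or.inl rfl)
  set r := terms.foldl (pvStepA q) (-1) with hr
  by_cases hrn : r = -1
  · -- no term occurs: every position fails
    have hnone : (List.range q.toList.length).find?
        (fun i => ((terms.filter (fun t => t ≠ "")).map String.toList).any
          (fun t => PySem.Chars.startswith (q.toList.drop i) t)) = none := by
      rw [List.find?_eq_none]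
      intro i _ hi
      obtain ⟨t, ht, hne, hp⟩ := (pvAny_iff q terms i).mp hi
      have := pvPrefix_find q t i hp
      exact (c2 t ht hne this.1).1 hrn
    rw [hnone, hrn]; rfl
  · -- r is the least matching position
    have hr0 : 0 ≤ r := c1.resolve_left hrn
    obtain ⟨t, ht, hne, hf⟩ := (c4 hrn).resolve_left hrn
    have hfn : 0 ≤ PySem.Chars.find q.toList t.toList := by
      simp only [PySem.Str.find] at hf; omega
    have hspec := PySem.Chars.find_spec hfn
    have hk : (PySem.Chars.find q.toList t.toList).toNat = r.toNat := by
      simp only [PySem.Str.find] at hf; omega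
    rw [hk] at hspec
    have hmk : ∃ u ∈ terms, u ≠ "" ∧ u.toList <+: q.toList.drop r.toNat :=
      ⟨t, ht, hne, hspec.1⟩
    have hlt : r.toNat < q.toList.length := by
      have h1 : t.toList ≠ [] := by
        intro h
        apply hne
        have h2 := congrArg String.ofList h
        simpa using h2
      have h2 := hspec.1.length_le
      rw [List.length_drop] at h2
      have := List.length_pos_iff.mpr h1
      omega
    have hsome : (List.range q.toList.length).find?
        (fun i => ((terms.filter (fun t => t ≠ "")).map String.toList).any
          (fun t => PySem.Chars.startswith (q.toList.drop i) t)) = some r.toNat := by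
      rw [List.range_eq_range']
      apply pvFind?_range' 0 q.toList.length r.toNat (Nat.zero_le _) (by omega)
      · exact (pvAny_iff q terms r.toNat).mpr hmk
      · intro j _ hj
        by_contra hjp
        rw [Bool.not_eq_false] at hjp
        obtain ⟨u, hu, hune, hup⟩ := (pvAny_iff q terms j).mp hjp
        obtain ⟨hu0, hule⟩ := pvPrefix_find q u j hup
        have := (c2 u hu hune hu0).2
        omega
    rw [hsome]
    simp only [Option.elim]
    omega
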